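-- pv_equiv track=rewrite | github.com/rkechols/Advent2022 | day_21.py | dfs_calc_inverse
-- ===== SOURCE A (Python) =====
-- from typing import Dict, List, Tuple, Union
--
-- def dfs_calc_inverse(
--         data: Dict[str, Union[int, Tuple[str, str, str]]],
--         cache: Dict[str, int],
--         cur: str,
--         target: int,
-- ) -> int:
--     val = data[cur]
--     if val is None:
--         # we got down to the value we're solving for
--         return target  # cascades upward
--     if not isinstance(val, tuple):
--         raise TypeError("algorithm error: didn't get tuple")
--     left_id, op, right_id = val
--     # figure out 'target', which is the expected value of one of the sub-trees
--     if left_id in cache:  # solving for right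
--         next_cur = right_id
--         match op:
--             case "+":
--                 new_target = target - cache[left_id]
--             case "*":
--                 new_target = target // cache[left_id]
--             case "-":
--                 new_target = cache[left_id] - target
--             case "/":
--                 new_target = cache[left_id] // target
--             case _:
--                 raise ValueError(f"unknown operator: {op}")
--     elif right_id in cache:  # solving for left
--         next_cur = left_id
--         match op:
--             case "+":
--                 new_target = target - cache[right_id]
--             case "*":
--                 new_target = target // cache[right_id]
--             case "-":
--                 new_target = target + cache[right_id]
--             case "/":
--                 new_target = target * cache[right_id]
--             case _:
--                 raise ValueError(f"unknown operator: {op}")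
--     else:
--         raise KeyError("algorithm error: neither child in cache")
--     # recursion down the tree, then cascade the answer upward
--     return dfs_calc_inverse(data, cache, next_cur, new_target)
-- ===== SOURCE B (Python) =====
-- def dfs_calc_inverse(data, cache, cur, target):
--     # Phase 1: walk down the tree (target plays no role in choosing the route),
--     # recording for each node the operator, which side is known, and the known value.
--     steps = []
--     while True:
--         val = data[cur]
--         if val is None:
--             break
--         if not isinstance(val, tuple):
--             raise TypeError("algorithm error: didn't get tuple")
--         left_id, op, right_id = val
--         if op not in ("+", "-", "*", "/"):
--             raise ValueError(f"unknown operator: {op}")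
--         if left_id in cache:
--             steps.append((op, True, cache[left_id]))
--             cur = right_id
--         elif right_id in cache:
--             steps.append((op, False, cache[right_id]))
--             cur = left_id
--         else:
--             raise KeyError("algorithm error: neither child in cache")
--     # Phase 2: fold the inverse operations over the recorded steps.
--     for op, left_known, c in steps:
--         if op == "+":
--             target = target - c
--         elif op == "*":
--             target = target // c
--         elif op == "-":
--             target = c - target if left_known else target + c
--         else:
--             target = c // target if left_known else target * c
--     return target
-- ===== Notes on version B (the rewrite author's own statement) =====
-- stated objective: alternative
-- what changed: B replaces A's tail recursion by a two-phase iteration: a while-loop first walks the tree collecting (operator, known-side, known-value) steps -- the route is independent of target -- and a second loop then folds the inverse operations over that step list.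
import Mathlib
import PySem

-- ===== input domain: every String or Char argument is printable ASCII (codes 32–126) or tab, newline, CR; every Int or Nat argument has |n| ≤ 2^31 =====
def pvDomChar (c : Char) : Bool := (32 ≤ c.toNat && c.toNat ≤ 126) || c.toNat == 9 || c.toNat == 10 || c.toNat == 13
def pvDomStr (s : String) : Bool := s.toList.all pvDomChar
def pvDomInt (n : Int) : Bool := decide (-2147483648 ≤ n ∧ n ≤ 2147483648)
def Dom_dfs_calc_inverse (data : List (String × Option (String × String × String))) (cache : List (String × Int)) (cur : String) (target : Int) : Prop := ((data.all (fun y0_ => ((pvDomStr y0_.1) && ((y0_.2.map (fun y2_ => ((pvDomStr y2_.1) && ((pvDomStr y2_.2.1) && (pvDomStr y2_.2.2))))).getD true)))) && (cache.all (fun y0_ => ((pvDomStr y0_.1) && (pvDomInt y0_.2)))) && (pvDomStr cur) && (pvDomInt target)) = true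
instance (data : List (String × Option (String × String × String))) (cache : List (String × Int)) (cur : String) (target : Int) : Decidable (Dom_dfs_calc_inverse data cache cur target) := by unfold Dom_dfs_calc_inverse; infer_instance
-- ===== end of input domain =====

-- B rewrites A's tail recursion as two loops: first collect the (operator, known side, known value)
-- step list by walking the tree (the route is independent of target), then fold the inverse
-- operations over that list; same results, same cost (objective: alternative decomposition).

-- dict lookup, first match (Python `d[k]` under the association-list convention)
def pvLookup {α : Type} (xs : List (String × α)) (k : String) : Option α :=
  (xs.find? (fun p => p.1 == k)).map (·.2)

-- Python `k in d`
def pvContains {α : Type} (xs : List (String × α)) (k : String) : Bool :=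
  xs.any (fun p => p.1 == k)

-- ===== PORT A =====
-- Literal port of A's tail recursion. Fuel (data.length + 1) only makes the recursion total in
-- Lean: on every input Pre_ admits the walk visits distinct keys of data, so fuel never runs out.
-- Error paths on which the Python raises (KeyError/ValueError; excluded by Pre_) return 0.
-- A's `isinstance(val, tuple)` TypeError branch is unreachable under the declared dict value type.
def dfs_calc_inverse_go (data : List (String × Option (String × String × String)))
    (cache : List (String × Int)) : String → Int → Nat → Int
  | _, _, 0 => 0
  | cur, target, fuel + 1 =>
    match pvLookup data cur with
    | none => 0                      -- KeyError: data[cur]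
    | some none => target            -- val is None
    | some (some (left_id, op, right_id)) =>
      if pvContains cache left_id then  -- solving for right
        let c := (pvLookup cache left_id).getD 0
        if op == "+" then dfs_calc_inverse_go data cache right_id (target - c) fuel
        else if op == "*" then dfs_calc_inverse_go data cache right_id (PySem.Int.floordiv target c) fuel
        else if op == "-" then dfs_calc_inverse_go data cache right_id (c - target) fuel
        else if op == "/" then dfs_calc_inverse_go data cache right_id (PySem.Int.floordiv c target) fuel
        else 0                       -- ValueError: unknown operator
      else if pvContains cache right_id then  -- solving for left
        let c := (pvLookup cache right_id).getD 0
        if op == "+" then dfs_calc_inverse_go data cache left_id (target - c) fuel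
        else if op == "*" then dfs_calc_inverse_go data cache left_id (PySem.Int.floordiv target c) fuel
        else if op == "-" then dfs_calc_inverse_go data cache left_id (target + c) fuel
        else if op == "/" then dfs_calc_inverse_go data cache left_id (target * c) fuel
        else 0                       -- ValueError: unknown operator
      else 0                         -- KeyError: neither child in cache

def dfs_calc_inverse (data : List (String × Option (String × String × String))) (cache : List (String × Int)) (cur : String) (target : Int) : Int :=
  dfs_calc_inverse_go data cache cur target (data.length + 1)

-- ===== PORT B =====
-- Phase 1 of Source B: the while-loop that records (op, left_known, c) steps; none = the loop raises.
-- The same fuel guard makes the loop total in Lean (inside Pre_ the walk visits distinct keys).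
def pvCollect (data : List (String × Option (String × String × String)))
    (cache : List (String × Int)) : String → Nat → Option (List (String × Bool × Int))
  | _, 0 => none
  | cur, fuel + 1 =>
    match pvLookup data cur with
    | none => none                   -- KeyError: data[cur]
    | some none => some []           -- break
    | some (some (left_id, op, right_id)) =>
      if !(op == "+" || op == "-" || op == "*" || op == "/") then none  -- ValueError
      else if pvContains cache left_id then
        (pvCollect data cache right_id fuel).map ((op, true, (pvLookup cache left_id).getD 0) :: ·)
      else if pvContains cache right_id then
        (pvCollect data cache left_id fuel).map ((op, false, (pvLookup cache right_id).getD 0) :: ·)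
      else none                      -- KeyError: neither child in cache

-- Phase 2 of Source B: one inverse step applied to the running target.
def pvApply (target : Int) (s : String × Bool × Int) : Int :=
  match s with
  | (op, left_known, c) =>
    if op == "+" then target - c
    else if op == "*" then PySem.Int.floordiv target c
    else if op == "-" then (if left_known then c - target else target + c)
    else (if left_known then PySem.Int.floordiv c target else target * c)

def dfs_calc_inverse_alt (data : List (String × Option (String × String × String))) (cache : List (String × Int)) (cur : String) (target : Int) : Int :=
  match pvCollect data cache cur (data.length + 1) with
  | none => 0
  | some steps => steps.foldl pvApply target

-- ===== PRECONDITION & SPEC =====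
-- drop every entry whose key is k (the Pre_ checker's "mark k visited")
def pvErase {α : Type} (xs : List (String × α)) (k : String) : List (String × α) :=
  xs.filter (fun p => !(p.1 == k))

-- Pre_ holds exactly when the Python A returns: the walk from cur, which visits each key of data
-- at most once (a revisited key is a cycle, on which A exhausts the recursion limit), ends at a
-- None entry, with a known operator and a cached child at every node and never a division by zero.
-- Termination of a walk over the input graph is necessarily stated by following the walk; the
-- checker recurses on the shrinking list of unvisited entries (the Nat argument is just that
-- list's length, kept explicit so the checker is structurally recursive and decide-computable).
def pvPreOk (cache : List (String × Int)) :
    Nat → List (String × Option (String × String × String)) → String → Int → Bool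
  | 0, _, _, _ => false   -- unreachable when started at rem.length + 1: each step erases a key
  | n + 1, rem, cur, target =>
    match rem.find? (fun p => p.1 == cur) with
    | none => false
    | some (_, none) => true
    | some (_, some (left_id, op, right_id)) =>
      if pvContains cache left_id then
        let c := (pvLookup cache left_id).getD 0
        if op == "+" then pvPreOk cache n (pvErase rem cur) right_id (target - c)
        else if op == "*" then c != 0 && pvPreOk cache n (pvErase rem cur) right_id (PySem.Int.floordiv target c)
        else if op == "-" then pvPreOk cache n (pvErase rem cur) right_id (c - target)
        else if op == "/" then target != 0 && pvPreOk cache n (pvErase rem cur) right_id (PySem.Int.floordiv c target)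
        else false
      else if pvContains cache right_id then
        let c := (pvLookup cache right_id).getD 0
        if op == "+" then pvPreOk cache n (pvErase rem cur) left_id (target - c)
        else if op == "*" then c != 0 && pvPreOk cache n (pvErase rem cur) left_id (PySem.Int.floordiv target c)
        else if op == "-" then pvPreOk cache n (pvErase rem cur) left_id (target + c)
        else if op == "/" then pvPreOk cache n (pvErase rem cur) left_id (target * c)
        else false
      else false

def Pre_dfs_calc_inverse (data : List (String × Option (String × String × String))) (cache : List (String × Int)) (cur : String) (target : Int) : Prop :=
  pvPreOk cache (data.length + 1) data cur target = true

instance (data : List (String × Option (String × String × String))) (cache : List (String × Int)) (cur : String) (target : Int) : Decidable (Pre_dfs_calc_inverse data cache cur target) := by unfold Pre_dfs_calc_inverse; infer_instance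

def pvWitness_dfs_calc_inverse : (List (String × Option (String × String × String))) × (List (String × Int)) × String × Int :=
  ([("root", some ("a", "+", "x")), ("x", none)], [("a", 2)], "root", 5)

def Spec_dfs_calc_inverse (data : List (String × Option (String × String × String))) (cache : List (String × Int)) (cur : String) (target : Int) (out : Int) : Prop := out = dfs_calc_inverse_alt data cache cur target
instance (data : List (String × Option (String × String × String))) (cache : List (String × Int)) (cur : String) (target : Int) (out : Int) : Decidable (Spec_dfs_calc_inverse data cache cur target out) := by unfold Spec_dfs_calc_inverse; infer_instance

-- ===== CLAIM (what is proved, stated in full; the proofs are below) =====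
def Claim_equal_dfs_calc_inverse : Prop := ∀ (data : List (String × Option (String × String × String))) (cache : List (String × Int)) (cur : String) (target : Int), Dom_dfs_calc_inverse data cache cur target → Pre_dfs_calc_inverse data cache cur target → Spec_dfs_calc_inverse data cache cur target (dfs_calc_inverse data cache cur target)

-- ===== LEMMAS AND PROOFS =====

-- The two ports agree step for step for EVERY fuel value: A's recursion with running target equals
-- interpreting B's collected step list by folding pvApply (both return 0 on the error/fuel paths).
theorem go_eq_collect (data : List (String × Option (String × String × String)))
    (cache : List (String × Int)) :
    ∀ (fuel : Nat) (cur : String) (target : Int),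
      dfs_calc_inverse_go data cache cur target fuel =
        (match pvCollect data cache cur fuel with
         | none => 0
         | some steps => steps.foldl pvApply target) := by
  intro fuel
  induction fuel with
  | zero => intro cur target; rfl
  | succ fuel ih =>
    intro cur target
    rw [dfs_calc_inverse_go, pvCollect]
    match pvLookup data cur with
    | none => rfl
    | some none => rfl
    | some (some (l, op, r)) =>
      by_cases hl : pvContains cache l = true
      · by_cases hp : op == "+"
        · simp only [hl, hp, if_true, if_pos, Bool.or_eq_true, Bool.not_eq_true']
          simp only [hp, Bool.true_or, Bool.not_true, Bool.false_eq_true, if_false, ih]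
          cases pvCollect data cache r fuel with
          | none => rfl
          | some steps => simp [List.foldl, pvApply, hp]
        · by_cases hm : op == "*"
          · simp only [hl, hp, hm, if_true, if_false, Bool.or_eq_true, Bool.not_eq_true']
            simp only [hp, hm, Bool.true_or, Bool.or_true, Bool.not_true, Bool.false_eq_true, if_false, ih]
            cases pvCollect data cache r fuel with
            | none => rfl
            | some steps => simp [List.foldl, pvApply, hp, hm]
          · by_cases hs : op == "-"
            · simp only [hl, hp, hm, hs, if_true, if_false, Bool.or_eq_true, Bool.not_eq_true']
              simp only [hp, hm, hs, Bool.true_or, Bool.or_true, Bool.not_true, Bool.false_eq_true, if_false, ih]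
              cases pvCollect data cache r fuel with
              | none => rfl
              | some steps => simp [List.foldl, pvApply, hp, hm, hs]
            · by_cases hd : op == "/"
              · simp only [hl, hp, hm, hs, hd, if_true, if_false, Bool.or_eq_true, Bool.not_eq_true']
                simp only [hp, hm, hs, hd, Bool.or_true, Bool.not_true, Bool.false_eq_true, if_false, ih]
                cases pvCollect data cache r fuel with
                | none => rfl
                | some steps => simp [List.foldl, pvApply, hp, hm, hs, hd]
              · simp [hl, hp, hm, hs, hd]
      · by_cases hr : pvContains cache r = true
        · by_cases hp : op == "+"
          · simp only [hl, hr, hp, if_true, if_false, Bool.false_eq_true, Bool.or_eq_true, Bool.not_eq_true']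
            simp only [hp, Bool.true_or, Bool.not_true, Bool.false_eq_true, if_false, ih]
            cases pvCollect data cache l fuel with
            | none => rfl
            | some steps => simp [List.foldl, pvApply, hp]
          · by_cases hm : op == "*"
            · simp only [hl, hr, hp, hm, if_true, if_false, Bool.false_eq_true, Bool.or_eq_true, Bool.not_eq_true']
              simp only [hp, hm, Bool.true_or, Bool.or_true, Bool.not_true, Bool.false_eq_true, if_false, ih]
              cases pvCollect data cache l fuel with
              | none => rfl
              | some steps => simp [List.foldl, pvApply, hp, hm]
            · by_cases hs : op == "-"
              · simp only [hl, hr, hp, hm, hs, if_true, if_false, Bool.false_eq_true, Bool.or_eq_true, Bool.not_eq_true']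
                simp only [hp, hm, hs, Bool.true_or, Bool.or_true, Bool.not_true, Bool.false_eq_true, if_false, ih]
                cases pvCollect data cache l fuel with
                | none => rfl
                | some steps => simp [List.foldl, pvApply, hp, hm, hs]
              · by_cases hd : op == "/"
                · simp only [hl, hr, hp, hm, hs, hd, if_true, if_false, Bool.false_eq_true, Bool.or_eq_true, Bool.not_eq_true']
                  simp only [hp, hm, hs, hd, Bool.or_true, Bool.not_true, Bool.false_eq_true, if_false, ih]
                  cases pvCollect data cache l fuel with
                  | none => rfl
                  | some steps => simp [List.foldl, pvApply, hp, hm, hs, hd]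
                · simp [hl, hr, hp, hm, hs, hd]
        · simp [hl, hr]

-- ===== VERDICT (by name: the statement is the Claim_ definition above) =====
theorem dfs_calc_inverse_spec : Claim_equal_dfs_calc_inverse := by
  intro data cache cur target _ _
  unfold Spec_dfs_calc_inverse dfs_calc_inverse dfs_calc_inverse_alt
  exact go_eq_collect data cache (data.length + 1) cur target
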